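-- pv_equiv track=rewrite | github.com/zen-logic/mail-hunter | mail_hunter/services/importer.py | find_server_for_message
-- ===== SOURCE A (Python) =====
-- def find_server_for_message(parsed: dict, server_cache: dict[str, int]) -> int | None:
--     """Find a matching server for a parsed message by checking from/to addresses."""
--     from_addr = (parsed.get("from_addr") or "").strip().lower()
--     to_addr = (parsed.get("to_addr") or "").strip().lower()
--
--     # Check from_addr
--     if from_addr in server_cache:
--         return server_cache[from_addr]
--
--     # Check to_addr (may contain multiple comma-separated addresses)
--     for addr in to_addr.split(","):
--         addr = addr.strip()
--         # Strip angle brackets and name portion if present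
--         if "<" in addr and ">" in addr:
--             addr = addr[addr.index("<") + 1 : addr.index(">")].strip()
--         if addr in server_cache:
--             return server_cache[addr]
--
--     # Check from_addr with angle brackets too
--     if "<" in from_addr and ">" in from_addr:
--         bare = from_addr[from_addr.index("<") + 1 : from_addr.index(">")].strip()
--         if bare in server_cache:
--             return server_cache[bare]
--
--     return None
-- ===== SOURCE B (Python) =====
-- def find_server_for_message(parsed: dict, server_cache: dict[str, int]) -> int | None:
--     """Find a matching server for a parsed message by checking from/to addresses."""
--     def bare(a):
--         if "<" in a and ">" in a:
--             return a[a.index("<") + 1 : a.index(">")].strip()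
--         return a
--
--     from_addr = (parsed.get("from_addr") or "").strip().lower()
--     to_addr = (parsed.get("to_addr") or "").strip().lower()
--     candidates = (
--         [from_addr]
--         + [bare(p.strip()) for p in to_addr.split(",")]
--         + [bare(from_addr)]
--     )
--     # Inverted traversal: scan the cache once; for each key take its priority
--     # (its first position in the candidate list) and keep the best-priority hit.
--     best = None  # (priority, value)
--     for key, value in server_cache.items():
--         try:
--             i = candidates.index(key)
--         except ValueError:
--             continue
--         if best is None or i < best[0]:
--             best = (i, value)
--     return best[1] if best is not None else None
-- ===== Notes on version B (the rewrite author's own statement) =====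
-- stated objective: alternative
-- what changed: Inverts the search: instead of probing the cache with each candidate address in order with early exit, B builds the ordered candidate list once and then scans the cache's entries, computing each key's position in the candidate list and keeping the minimum-position hit (argmin over cache entries).
import Mathlib
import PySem

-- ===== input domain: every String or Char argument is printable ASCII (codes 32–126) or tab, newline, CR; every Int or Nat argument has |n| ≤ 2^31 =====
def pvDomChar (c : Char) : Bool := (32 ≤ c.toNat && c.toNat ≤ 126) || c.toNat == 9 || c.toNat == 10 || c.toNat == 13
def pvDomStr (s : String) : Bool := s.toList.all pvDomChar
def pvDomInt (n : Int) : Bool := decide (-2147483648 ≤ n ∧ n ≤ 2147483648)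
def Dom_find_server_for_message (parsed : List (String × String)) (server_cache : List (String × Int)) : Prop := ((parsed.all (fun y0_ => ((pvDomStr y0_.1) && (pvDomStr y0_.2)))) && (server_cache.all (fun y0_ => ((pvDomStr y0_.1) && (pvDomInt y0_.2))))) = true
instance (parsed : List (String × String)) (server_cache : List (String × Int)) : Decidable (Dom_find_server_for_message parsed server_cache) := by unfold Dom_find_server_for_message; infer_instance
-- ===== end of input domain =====

-- B inverts the search: it builds the candidate list once, then scans the cache's entries and
-- keeps the hit whose key has the minimum position in the candidate list (objective: alternative).
-- Return values proved equal on all inputs.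

-- ===== PORT A =====
-- A's 'for addr in to_addr.split(","): …' loop, step for step
def pvLoopA (addrs : List String) (server_cache : List (String × Int)) : Option Int :=
  match addrs with
  | [] => none
  | a :: rest =>
    let a1 := PySem.Str.strip a
    let a2 := if PySem.Str.isIn "<" a1 && PySem.Str.isIn ">" a1 then
        PySem.Str.strip (PySem.Str.slice a1 (some (PySem.Str.find a1 "<" + 1)) (some (PySem.Str.find a1 ">")))
      else a1
    match server_cache.lookup a2 with
    | some v => some v
    | none => pvLoopA rest server_cache

def find_server_for_message (parsed : List (String × String)) (server_cache : List (String × Int)) : Option Int :=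
  let from_addr := PySem.Str.lower (PySem.Str.strip ((parsed.lookup "from_addr").getD ""))
  let to_addr := PySem.Str.lower (PySem.Str.strip ((parsed.lookup "to_addr").getD ""))
  match server_cache.lookup from_addr with
  | some v => some v
  | none =>
    match pvLoopA ((PySem.Str.split? to_addr ",").getD []) server_cache with  -- sep "," ≠ "", split? is exact here
    | some v => some v
    | none =>
      if PySem.Str.isIn "<" from_addr && PySem.Str.isIn ">" from_addr then
        let bare := PySem.Str.strip (PySem.Str.slice from_addr
          (some (PySem.Str.find from_addr "<" + 1)) (some (PySem.Str.find from_addr ">")))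
        match server_cache.lookup bare with
        | some v => some v
        | none => none
      else none

-- ===== PORT B =====
def pvBare (a : String) : String :=
  if PySem.Str.isIn "<" a && PySem.Str.isIn ">" a then
    PySem.Str.strip (PySem.Str.slice a (some (PySem.Str.find a "<" + 1)) (some (PySem.Str.find a ">")))
  else a

-- Source B's 'for key, value in server_cache.items(): …' argmin loop, step for step
def pvBestLoop (entries : List (String × Int)) (cands : List String) (best : Option (Nat × Int)) : Option (Nat × Int) :=
  match entries with
  | [] => best
  | (k, v) :: rest =>
    match PySem.List.index? cands k with
    | none => pvBestLoop rest cands best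
    | some i =>
      match best with
      | none => pvBestLoop rest cands (some (i, v))
      | some (bi, bv) =>
        if i < bi then pvBestLoop rest cands (some (i, v))
        else pvBestLoop rest cands (some (bi, bv))

def find_server_for_message_alt (parsed : List (String × String)) (server_cache : List (String × Int)) : Option Int :=
  let from_addr := PySem.Str.lower (PySem.Str.strip ((parsed.lookup "from_addr").getD ""))
  let to_addr := PySem.Str.lower (PySem.Str.strip ((parsed.lookup "to_addr").getD ""))
  let candidates := [from_addr] ++
    (((PySem.Str.split? to_addr ",").getD []).map (fun p => pvBare (PySem.Str.strip p)) ++ [pvBare from_addr])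
  match pvBestLoop server_cache candidates none with
  | none => none
  | some (_, v) => some v

-- ===== PRECONDITION & SPEC =====
def Spec_find_server_for_message (parsed : List (String × String)) (server_cache : List (String × Int)) (out : Option Int) : Prop := out = find_server_for_message_alt parsed server_cache
instance (parsed : List (String × String)) (server_cache : List (String × Int)) (out : Option Int) : Decidable (Spec_find_server_for_message parsed server_cache out) := by unfold Spec_find_server_for_message; infer_instance

-- ===== CLAIM =====
def Claim_equal_find_server_for_message : Prop := ∀ (parsed : List (String × String)) (server_cache : List (String × Int)), Dom_find_server_for_message parsed server_cache → Spec_find_server_for_message parsed server_cache (find_server_for_message parsed server_cache)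

-- ===== LEMMAS AND PROOFS =====

-- proof-only helper: first-match scan of a candidate list against the cache
def pvScan (cands : List String) (server_cache : List (String × Int)) : Option Int :=
  match cands with
  | [] => none
  | c :: rest =>
    match server_cache.lookup c with
    | some v => some v
    | none => pvScan rest server_cache

-- A's to-loop is a first-match scan over the bare-mapped parts
theorem pvLoopA_eq_scan (addrs : List String) (sc : List (String × Int)) :
    pvLoopA addrs sc = pvScan (addrs.map (fun p => pvBare (PySem.Str.strip p))) sc := by
  induction addrs with
  | nil => rfl
  | cons a rest ih =>
    show (match sc.lookup (pvBare (PySem.Str.strip a)) with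
          | some v => some v
          | none => pvLoopA rest sc) =
         (match sc.lookup (pvBare (PySem.Str.strip a)) with
          | some v => some v
          | none => pvScan (rest.map (fun p => pvBare (PySem.Str.strip p))) sc)
    cases sc.lookup (pvBare (PySem.Str.strip a)) <;> simp [ih]

-- A is the first-match scan over the full candidate list
theorem pvScan_append (xs ys : List String) (sc : List (String × Int)) :
    pvScan (xs ++ ys) sc = (pvScan xs sc).orElse (fun _ => pvScan ys sc) := by
  induction xs with
  | nil => rfl
  | cons x xs ih =>
    show (match sc.lookup x with
          | some v => some v
          | none => pvScan (xs ++ ys) sc) = _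
    cases h : sc.lookup x <;> simp [pvScan, h, ih]

theorem A_eq_scan (parsed : List (String × String)) (sc : List (String × Int)) :
    find_server_for_message parsed sc =
      pvScan ([PySem.Str.lower (PySem.Str.strip ((parsed.lookup "from_addr").getD ""))] ++
        (((PySem.Str.split? (PySem.Str.lower (PySem.Str.strip ((parsed.lookup "to_addr").getD ""))) ",").getD []).map
          (fun p => pvBare (PySem.Str.strip p)) ++
         [pvBare (PySem.Str.lower (PySem.Str.strip ((parsed.lookup "from_addr").getD "")))])) sc := by
  simp only [find_server_for_message]
  rw [pvLoopA_eq_scan]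
  generalize PySem.Str.lower (PySem.Str.strip ((parsed.lookup "from_addr").getD "")) = fa
  generalize ((PySem.Str.split? (PySem.Str.lower (PySem.Str.strip ((parsed.lookup "to_addr").getD ""))) ",").getD []).map (fun p => pvBare (PySem.Str.strip p)) = L
  show _ = pvScan ([fa] ++ (L ++ [pvBare fa])) sc
  rw [pvScan_append]
  cases h1 : sc.lookup fa with
  | some v => simp [pvScan, h1]
  | none =>
    simp only [pvScan, h1, Option.orElse]
    rw [pvScan_append]
    cases h2 : pvScan L sc with
    | some v => rfl
    | none =>
      show (if PySem.Str.isIn "<" fa && PySem.Str.isIn ">" fa then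
              match sc.lookup (PySem.Str.strip (PySem.Str.slice fa
                (some (PySem.Str.find fa "<" + 1)) (some (PySem.Str.find fa ">")))) with
              | some v => some v
              | none => none
            else none) = _
      by_cases hb : (PySem.Str.isIn "<" fa && PySem.Str.isIn ">" fa) = true
      · rw [if_pos hb]
        simp only [pvScan, pvBare, if_pos hb]
        cases sc.lookup (PySem.Str.strip (PySem.Str.slice fa
          (some (PySem.Str.find fa "<" + 1)) (some (PySem.Str.find fa ">")))) <;> rfl
      · rw [if_neg hb]
        simp only [pvScan, Option.orElse]
        unfold pvBare
        rw [if_neg hb, h1]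

-- a best at position 0 can never be improved (indices are Nats)
theorem pvBestLoop_absorb (sc : List (String × Int)) (cands : List String) (v : Int) :
    pvBestLoop sc cands (some (0, v)) = some (0, v) := by
  induction sc with
  | nil => rfl
  | cons e rest ih =>
    obtain ⟨k, w⟩ := e
    simp only [pvBestLoop]
    cases PySem.List.index? cands k with
    | none => exact ih
    | some i => simp [ih]

-- if the head candidate is a cache key, the argmin ends at position 0 with its looked-up value
theorem pvBestLoop_hit (sc : List (String × Int)) (c : String) (cs : List String) (v : Int)
    (b : Option (Nat × Int))
    (hb : b = none ∨ ∃ i w, b = some (i, w) ∧ 0 < i)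
    (h : sc.lookup c = some v) :
    pvBestLoop sc (c :: cs) b = some (0, v) := by
  induction sc generalizing b with
  | nil => simp at h
  | cons e rest ih =>
    obtain ⟨k, w⟩ := e
    by_cases hk : c = k
    · subst hk
      have hv : w = v := by simpa using h
      subst hv
      simp only [pvBestLoop, PySem.List.index?_cons_self]
      rcases hb with hb | ⟨i, w', hb, hi⟩
      · subst hb; exact pvBestLoop_absorb _ _ _
      · subst hb
        dsimp only
        rw [if_pos hi]
        exact pvBestLoop_absorb _ _ _
    · have hbeq : (c == k) = false := beq_eq_false_iff_ne.mpr hk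
      have h' : rest.lookup c = some v := by
        simpa [List.lookup, hbeq] using h
      simp only [pvBestLoop]
      rw [PySem.List.index?_cons_of_ne cs hk]
      cases hj : PySem.List.index? cs k with
      | none => exact ih b hb h'
      | some j =>
        simp only [Option.map_some]
        rcases hb with hb | ⟨i, w', hb, hi⟩
        · subst hb
          exact ih _ (Or.inr ⟨j + 1, w, rfl, Nat.succ_pos j⟩) h'
        · subst hb
          dsimp only
          by_cases hlt : j + 1 < i
          · rw [if_pos hlt]
            exact ih _ (Or.inr ⟨j + 1, w, rfl, Nat.succ_pos j⟩) h'
          · rw [if_neg hlt]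
            exact ih _ (Or.inr ⟨i, w', rfl, hi⟩) h'

-- if the head candidate is not a key, every index shifts by one and the argmin is preserved
theorem pvBestLoop_shift (sc : List (String × Int)) (c : String) (cs : List String)
    (h : sc.lookup c = none) (b : Option (Nat × Int)) :
    pvBestLoop sc (c :: cs) (b.map (fun p => (p.1 + 1, p.2))) =
      (pvBestLoop sc cs b).map (fun p => (p.1 + 1, p.2)) := by
  induction sc generalizing b with
  | nil => rfl
  | cons e rest ih =>
    obtain ⟨k, w⟩ := e
    have hk : c ≠ k := by
      intro he; subst he; simp [List.lookup] at h
    have hbeq : (c == k) = false := beq_eq_false_iff_ne.mpr hk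
    have h' : rest.lookup c = none := by
      simpa [List.lookup, hbeq] using h
    simp only [pvBestLoop]
    rw [PySem.List.index?_cons_of_ne cs hk]
    cases hj : PySem.List.index? cs k with
    | none => exact ih h' b
    | some j =>
      simp only [Option.map_some]
      cases b with
      | none =>
        simpa using ih h' (some (j, w))
      | some p =>
        obtain ⟨bi, bv⟩ := p
        simp only [Option.map_some]
        by_cases hlt : j < bi
        · rw [if_pos (by omega : j + 1 < bi + 1), if_pos hlt]
          simpa using ih h' (some (j, w))
        · rw [if_neg (by omega : ¬ j + 1 < bi + 1), if_neg hlt]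
          simpa using ih h' (some (bi, bv))

-- the argmin over cache entries computes the first-match scan over candidates
theorem bestLoop_eq_scan (cands : List String) (sc : List (String × Int)) :
    (pvBestLoop sc cands none).map (fun p => p.2) = pvScan cands sc := by
  induction cands with
  | nil =>
    have : pvBestLoop sc [] none = none := by
      induction sc with
      | nil => rfl
      | cons e rest ih =>
        obtain ⟨k, w⟩ := e
        simpa [pvBestLoop, PySem.List.index?_eq_none_iff] using ih
    simp [this, pvScan]
  | cons c cs ih =>
    cases h : sc.lookup c with
    | some v =>
      rw [pvBestLoop_hit sc c cs v none (Or.inl rfl) h]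
      simp [pvScan, h]
    | none =>
      have := pvBestLoop_shift sc c cs h none
      simp only [Option.map_none] at this
      rw [this]
      simp only [pvScan, h, Option.map_map]
      exact ih

-- ===== VERDICT =====
theorem find_server_for_message_spec : Claim_equal_find_server_for_message := by
  intro parsed sc _
  simp only [Spec_find_server_for_message, find_server_for_message_alt]
  rw [A_eq_scan, ← bestLoop_eq_scan]
  cases pvBestLoop sc ([PySem.Str.lower (PySem.Str.strip ((parsed.lookup "from_addr").getD ""))] ++
    (((PySem.Str.split? (PySem.Str.lower (PySem.Str.strip ((parsed.lookup "to_addr").getD ""))) ",").getD []).map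
      (fun p => pvBare (PySem.Str.strip p)) ++
     [pvBare (PySem.Str.lower (PySem.Str.strip ((parsed.lookup "from_addr").getD "")))])) none with
  | none => rfl
  | some p => obtain ⟨i, v⟩ := p; rfl
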